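-- pv_equiv track=rewrite | github.com/ppawar/ppawar.github.io | Fall2018/CSE101-F18/Assignment3Answers/Assign3Answer3.py | scrabble_sort
-- ===== SOURCE A (Python) =====
-- def scrabble_sort(a):
--     for i in range(len(a)-1):
--         min = i
--         for j in range(i+1, len(a)):
--             if len(a[min]) > len(a[j]):
--                 min = j
--             elif len(a[min]) == len(a[j]) and a[min] > a[j]:
--                 min = j
--         a[i], a[min] = a[min], a[i]
--     return a
-- ===== SOURCE B (Python) =====
-- def scrabble_sort(a):
--     buckets = {}
--     for s in a:
--         buckets.setdefault(len(s), []).append(s)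
--     result = []
--     for length in sorted(buckets):
--         result.extend(sorted(buckets[length]))
--     a[:] = result
--     return a
-- ===== Notes on version B (the rewrite author's own statement) =====
-- stated objective: faster
-- what changed: Replaces A's quadratic in-place selection sort by (length, string) with a single pass that buckets strings by length in a dict, then concatenates each bucket sorted alphabetically in increasing length order (writing the result back in place).
import Mathlib
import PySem

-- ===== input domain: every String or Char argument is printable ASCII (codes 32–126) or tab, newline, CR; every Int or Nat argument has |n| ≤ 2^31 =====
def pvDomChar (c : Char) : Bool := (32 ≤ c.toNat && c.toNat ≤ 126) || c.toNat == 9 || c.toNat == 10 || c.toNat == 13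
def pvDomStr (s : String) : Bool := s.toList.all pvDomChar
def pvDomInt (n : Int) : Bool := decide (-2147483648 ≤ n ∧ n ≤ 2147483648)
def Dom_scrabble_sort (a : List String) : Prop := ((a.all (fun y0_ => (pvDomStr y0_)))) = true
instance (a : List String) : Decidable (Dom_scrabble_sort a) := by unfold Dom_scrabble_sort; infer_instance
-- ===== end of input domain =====

-- B replaces A's quadratic in-place selection sort (by length, ties alphabetical) with one-pass
-- bucketing by length followed by sorting each bucket alphabetically.  A mutates its argument in
-- place and returns it; B performs the same net mutation in Python via a[:] = result, and the
-- equivalence proved here is about the RETURN value.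

-- ===== PORT A =====
-- inner loop 'for j in range(i+1, len(a)): if len(a[min]) > len(a[j]): min = j elif len(a[min]) ==
-- len(a[j]) and a[min] > a[j]: min = j', walking the suffix after position i while carrying the
-- current minimum's value and index (branches in Python's order; 'a[min] > a[j]' is 'x < cur')
def ssInner : String → Nat → Nat → List String → String × Nat
  | cur, mi, _, [] => (cur, mi)
  | cur, mi, j, x :: rest =>
    if PySem.Str.len cur > PySem.Str.len x then ssInner x j (j+1) rest
    else if PySem.Str.len cur = PySem.Str.len x ∧ x < cur then ssInner x j (j+1) rest
    else ssInner cur mi (j+1) rest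

-- outer loop 'for i in range(len(a)-1): … a[i], a[min] = a[min], a[i]' as structural recursion on
-- the suffix starting at i (iteration i never touches a[0..i-1]): find the minimum of the suffix,
-- swap it to the front, recurse on the tail
def scrabble_sort (a : List String) : List String :=
  match a with
  | [] => []
  | x :: rest =>
    let r := ssInner x 0 1 rest
    if r.2 = 0 then x :: scrabble_sort rest
    else r.1 :: scrabble_sort (rest.set (r.2 - 1) x)
termination_by a.length
decreasing_by all_goals simp

-- ===== PORT B =====
-- 'buckets.setdefault(len(s), []).append(s)' = modify the entry for len(s), default [], appending s;
-- 'for length in sorted(buckets): result.extend(sorted(buckets[length]))' = the second foldl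
def scrabble_sort_alt (a : List String) : List String :=
  let buckets : PySem.Dict Int (List String) :=
    a.foldl (fun d s => d.modify (PySem.Str.len s) [] (fun b => b ++ [s])) PySem.Dict.empty
  let result : List String :=
    (PySem.List.sorted buckets.keys (fun k => k)).foldl
      (fun acc k => acc ++ PySem.List.sorted (buckets.getD k []) (fun s => s)) []
  result

-- ===== PRECONDITION & SPEC =====
def Spec_scrabble_sort (a : List String) (out : List String) : Prop := out = scrabble_sort_alt a
instance (a : List String) (out : List String) : Decidable (Spec_scrabble_sort a out) := by unfold Spec_scrabble_sort; infer_instance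

-- ===== CLAIM (what is proved, stated in full; the proofs are below) =====
def Claim_equal_scrabble_sort : Prop := ∀ (a : List String), Dom_scrabble_sort a → Spec_scrabble_sort a (scrabble_sort a)

-- ===== LEMMAS AND PROOFS =====

-- the key both programs sort by: (len s, s), lexicographically
def ssKey (s : String) : Lex (Int × String) := toLex (PySem.Str.len s, s)

theorem ssKey_injective : Function.Injective ssKey := by
  intro s t h
  have := congrArg (fun p => (ofLex p).2) h
  simpa [ssKey] using this

theorem ssKey_le_iff (s t : String) :
    ssKey s ≤ ssKey t ↔
      PySem.Str.len s < PySem.Str.len t ∨ (PySem.Str.len s = PySem.Str.len t ∧ s ≤ t) := by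
  simp [ssKey, Prod.Lex.le_iff]

theorem ssInner_spec (rest : List String) (cur : String) (mi j : Nat) :
    ((ssInner cur mi j rest).2 = mi ∧ (ssInner cur mi j rest).1 = cur ∨
      ∃ k, (ssInner cur mi j rest).2 = j + k ∧ rest[k]? = some (ssInner cur mi j rest).1) ∧
    ssKey (ssInner cur mi j rest).1 ≤ ssKey cur ∧
    ∀ y ∈ rest, ssKey (ssInner cur mi j rest).1 ≤ ssKey y := by
  induction rest generalizing cur mi j with
  | nil => simp [ssInner]
  | cons x rest ih =>
    by_cases h1 : PySem.Str.len cur > PySem.Str.len x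
    · have e : ssInner cur mi j (x :: rest) = ssInner x j (j+1) rest := by
        rw [ssInner, if_pos h1]
      have key_le : ssKey x ≤ ssKey cur := (ssKey_le_iff x cur).2 (Or.inl h1)
      obtain ⟨hidx, hcur, hall⟩ := ih x j (j+1)
      rw [e]
      refine ⟨?_, hcur.trans key_le, ?_⟩
      · rcases hidx with ⟨h2, h3⟩ | ⟨k, hk, hget⟩
        · exact Or.inr ⟨0, by omega, by simp [h3]⟩
        · exact Or.inr ⟨k+1, by omega, by simpa using hget⟩
      · intro y hy
        rcases List.mem_cons.1 hy with rfl | hy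
        · exact hcur
        · exact hall y hy
    · by_cases h2 : PySem.Str.len cur = PySem.Str.len x ∧ x < cur
      · have e : ssInner cur mi j (x :: rest) = ssInner x j (j+1) rest := by
          rw [ssInner, if_neg h1, if_pos h2]
        have key_le : ssKey x ≤ ssKey cur := (ssKey_le_iff x cur).2 (Or.inr ⟨h2.1.symm, le_of_lt h2.2⟩)
        obtain ⟨hidx, hcur, hall⟩ := ih x j (j+1)
        rw [e]
        refine ⟨?_, hcur.trans key_le, ?_⟩
        · rcases hidx with ⟨h3, h4⟩ | ⟨k, hk, hget⟩
          · exact Or.inr ⟨0, by omega, by simp [h4]⟩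
          · exact Or.inr ⟨k+1, by omega, by simpa using hget⟩
        · intro y hy
          rcases List.mem_cons.1 hy with rfl | hy
          · exact hcur
          · exact hall y hy
      · have e : ssInner cur mi j (x :: rest) = ssInner cur mi (j+1) rest := by
          rw [ssInner, if_neg h1, if_neg h2]
        have key_le : ssKey cur ≤ ssKey x := by
          rw [ssKey_le_iff]
          rcases lt_trichotomy (PySem.Str.len cur) (PySem.Str.len x) with h | h | h
          · exact Or.inl h
          · refine Or.inr ⟨h, ?_⟩
            by_contra hxc
            exact h2 ⟨h, lt_of_not_ge hxc⟩
          · exact absurd h (by omega)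
        obtain ⟨hidx, hcur, hall⟩ := ih cur mi (j+1)
        rw [e]
        refine ⟨?_, hcur, ?_⟩
        · rcases hidx with ⟨h3, h4⟩ | ⟨k, hk, hget⟩
          · exact Or.inl ⟨h3, h4⟩
          · exact Or.inr ⟨k+1, by omega, by simpa using hget⟩
        · intro y hy
          rcases List.mem_cons.1 hy with rfl | hy
          · exact hcur.trans key_le
          · exact hall y hy

theorem perm_swap_front {α : Type} (k : Nat) (l : List α) (v x : α) (h : l[k]? = some v) :
    (v :: l.set k x).Perm (x :: l) := by
  induction k generalizing l with
  | zero =>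
    cases l with
    | nil => simp at h
    | cons y t =>
      simp at h
      subst h
      exact List.Perm.swap x y t
  | succ k ih =>
    cases l with
    | nil => simp at h
    | cons y t =>
      simp at h
      exact ((List.Perm.swap y v (t.set k x))).trans (((ih t h).cons y).trans (List.Perm.swap x y t))

theorem scrabble_sort_perm (a : List String) : (scrabble_sort a).Perm a := by
  induction a using scrabble_sort.induct with
  | case1 => simp [scrabble_sort]
  | case2 x rest r hr ih =>
    have hr' : (ssInner x 0 1 rest).2 = 0 := hr
    rw [scrabble_sort]
    simp only [hr', if_true]
    exact ih.cons x
  | case3 x rest r hr ih =>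
    have hr' : ¬ (ssInner x 0 1 rest).2 = 0 := hr
    have ih' : (scrabble_sort (rest.set ((ssInner x 0 1 rest).2 - 1) x)).Perm
        (rest.set ((ssInner x 0 1 rest).2 - 1) x) := ih
    rw [scrabble_sort]
    simp only [if_neg hr']
    obtain ⟨hidx, -, -⟩ := ssInner_spec rest x 0 1
    rcases hidx with ⟨h2, -⟩ | ⟨k, hk, hget⟩
    · exact absurd h2 hr'
    · have hk1 : (ssInner x 0 1 rest).2 - 1 = k := by omega
      rw [hk1] at ih' ⊢
      exact (ih'.cons _).trans (perm_swap_front k rest _ x hget)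

theorem scrabble_sort_pairwise (a : List String) :
    (scrabble_sort a).Pairwise (fun s t => ssKey s ≤ ssKey t) := by
  induction a using scrabble_sort.induct with
  | case1 => simp [scrabble_sort]
  | case2 x rest r hr ih =>
    have hr' : (ssInner x 0 1 rest).2 = 0 := hr
    rw [scrabble_sort]
    simp only [hr', if_true]
    refine List.Pairwise.cons ?_ ih
    intro y hy
    obtain ⟨hidx, hcur, hall⟩ := ssInner_spec rest x 0 1
    have hx : (ssInner x 0 1 rest).1 = x := by
      rcases hidx with ⟨-, h⟩ | ⟨k, hk, -⟩
      · exact h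
      · omega
    have hy' : y ∈ rest := (scrabble_sort_perm rest).mem_iff.1 hy
    have := hall y hy'
    rwa [hx] at this
  | case3 x rest r hr ih =>
    have hr' : ¬ (ssInner x 0 1 rest).2 = 0 := hr
    rw [scrabble_sort]
    simp only [if_neg hr']
    refine List.Pairwise.cons ?_ ih
    intro y hy
    obtain ⟨-, hcur, hall⟩ := ssInner_spec rest x 0 1
    have hy' : y ∈ rest.set ((ssInner x 0 1 rest).2 - 1) x :=
      (scrabble_sort_perm _).mem_iff.1 hy
    rcases List.mem_or_eq_of_mem_set hy' with h | rfl
    · exact hall y h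
    · exact hcur

theorem buckets_getD (a : List String) (k : Int) :
    ((a.foldl (fun d s => d.modify (PySem.Str.len s) [] (fun b => b ++ [s]))
        (PySem.Dict.empty : PySem.Dict Int (List String))).getD k [])
      = a.filter (fun s => PySem.Str.len s == k) := by
  have h1 : a.foldl (fun d s => d.modify (PySem.Str.len s) [] (fun b => b ++ [s]))
        (PySem.Dict.empty : PySem.Dict Int (List String))
      = (a.map (fun s => (PySem.Str.len s, s))).foldl
          (fun d p => d.modify p.1 [] (fun b => b ++ [p.2])) PySem.Dict.empty := by
    rw [List.foldl_map]
  rw [h1, PySem.Dict.getD_foldl_modify_append]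
  rw [List.filter_map]
  simp [Function.comp_def]

theorem flatten_filter_perm (ks : List Int) (a : List String) (hnd : ks.Nodup)
    (hcov : ∀ s ∈ a, PySem.Str.len s ∈ ks) :
    (ks.map (fun k => a.filter (fun s => PySem.Str.len s == k))).flatten.Perm a := by
  induction ks generalizing a with
  | nil =>
    have : a = [] := by
      cases a with
      | nil => rfl
      | cons s t => exact absurd (hcov s (by simp)) (by simp)
    simp [this]
  | cons k ks ih =>
    simp only [List.map_cons, List.flatten_cons]
    have hfilters : ks.map (fun k' => a.filter (fun s => PySem.Str.len s == k'))
        = ks.map (fun k' => (a.filter (fun s => !(PySem.Str.len s == k))).filter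
            (fun s => PySem.Str.len s == k')) := by
      apply List.map_congr_left
      intro k' hk'
      have hne : k' ≠ k := by rintro rfl; exact (List.nodup_cons.1 hnd).1 hk'
      rw [List.filter_filter]
      apply List.filter_congr
      intro s _
      by_cases h : (s.length : Int) = k'
      · simp [h, hne]
      · simp [PySem.Str.len_eq, h]
    rw [hfilters]
    have hcov' : ∀ s ∈ a.filter (fun s => !(PySem.Str.len s == k)), PySem.Str.len s ∈ ks := by
      intro s hs
      have h1 := List.of_mem_filter hs
      have h2 := hcov s (List.mem_of_mem_filter hs)
      simp at h1
      rcases List.mem_cons.1 h2 with h | h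
      · exact absurd h h1
      · exact h
    have := ih (a.filter (fun s => !(PySem.Str.len s == k))) (List.nodup_cons.1 hnd).2 hcov'
    exact (this.append_left _).trans (List.filter_append_perm _ a)

theorem buckets_keys_mem (a : List String) (k : Int) :
    k ∈ (a.foldl (fun d s => d.modify (PySem.Str.len s) [] (fun b => b ++ [s]))
        (PySem.Dict.empty : PySem.Dict Int (List String))).keys
      ↔ k ∈ a.map (fun s => PySem.Str.len s) := by
  rw [PySem.Dict.keys_foldl_modify_key a (fun s => PySem.Str.len s) [] (fun _ s b => b ++ [s]) _]
  rw [PySem.Set.mem_update]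
  simp [show (PySem.Dict.empty : PySem.Dict Int (List String)).keys = [] from rfl]

theorem buckets_keys_nodup (a : List String) :
    (a.foldl (fun d s => d.modify (PySem.Str.len s) [] (fun b => b ++ [s]))
        (PySem.Dict.empty : PySem.Dict Int (List String))).keys.Nodup :=
  PySem.Dict.nodup_keys_foldl_modify_key a (fun s => PySem.Str.len s) [] (fun _ s b => b ++ [s]) _
    (by simp [show (PySem.Dict.empty : PySem.Dict Int (List String)).keys = [] from rfl])

theorem sortedKeys_nodup (a : List String) :
    (PySem.List.sorted (a.foldl (fun d s => d.modify (PySem.Str.len s) [] (fun b => b ++ [s]))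
        (PySem.Dict.empty : PySem.Dict Int (List String))).keys (fun k => k)).Nodup :=
  (PySem.List.sorted_perm _ _ _).nodup_iff.2 (buckets_keys_nodup a)

theorem sortedKeys_pairwise_lt (a : List String) :
    (PySem.List.sorted (a.foldl (fun d s => d.modify (PySem.Str.len s) [] (fun b => b ++ [s]))
        (PySem.Dict.empty : PySem.Dict Int (List String))).keys (fun k => k)).Pairwise (· < ·) := by
  refine ((PySem.List.sorted_pairwise _ _).and (sortedKeys_nodup a)).imp ?_
  rintro x y ⟨h1, h2⟩
  exact lt_of_le_of_ne h1 h2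

theorem scrabble_sort_alt_eq (a : List String) :
    scrabble_sort_alt a =
      ((PySem.List.sorted (a.foldl (fun d s => d.modify (PySem.Str.len s) [] (fun b => b ++ [s]))
          (PySem.Dict.empty : PySem.Dict Int (List String))).keys (fun k => k)).map
        (fun k => PySem.List.sorted (a.filter (fun s => PySem.Str.len s == k)) (fun s => s))).flatten := by
  unfold scrabble_sort_alt
  simp only
  rw [PySem.List.foldl_append_eq_flatMap, List.nil_append, List.flatMap_def]
  simp only [buckets_getD]

theorem scrabble_sort_alt_perm (a : List String) : (scrabble_sort_alt a).Perm a := by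
  rw [scrabble_sort_alt_eq, ← List.flatMap_def]
  have h1 : (List.flatMap (fun k => PySem.List.sorted (a.filter (fun s => PySem.Str.len s == k)) (fun s => s))
      (PySem.List.sorted (a.foldl (fun d s => d.modify (PySem.Str.len s) [] (fun b => b ++ [s]))
          (PySem.Dict.empty : PySem.Dict Int (List String))).keys (fun k => k))).Perm
      (List.flatMap (fun k => a.filter (fun s => PySem.Str.len s == k))
      (PySem.List.sorted (a.foldl (fun d s => d.modify (PySem.Str.len s) [] (fun b => b ++ [s]))
          (PySem.Dict.empty : PySem.Dict Int (List String))).keys (fun k => k))) :=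
    List.Perm.flatMap (List.Perm.refl _) (fun k _ => PySem.List.sorted_perm _ _ _)
  refine h1.trans ?_
  rw [List.flatMap_def]
  refine flatten_filter_perm _ a (sortedKeys_nodup a) ?_
  intro s hs
  rw [PySem.List.mem_sorted, buckets_keys_mem]
  exact List.mem_map_of_mem hs

theorem mem_sortedBucket_len (a : List String) (k : Int) (s : String)
    (hs : s ∈ PySem.List.sorted (a.filter (fun s => PySem.Str.len s == k)) (fun s => s)) :
    PySem.Str.len s = k := by
  have := List.of_mem_filter ((PySem.List.mem_sorted _ _ _ s).1 hs)
  simpa using this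

theorem scrabble_sort_alt_pairwise (a : List String) :
    (scrabble_sort_alt a).Pairwise (fun s t => ssKey s ≤ ssKey t) := by
  rw [scrabble_sort_alt_eq]
  rw [List.pairwise_flatten]
  constructor
  · intro l hl
    obtain ⟨k, hk, rfl⟩ := List.mem_map.1 hl
    refine List.Pairwise.imp_of_mem ?_ (PySem.List.sorted_pairwise _ _)
    intro s t hs ht hle
    rw [ssKey_le_iff]
    exact Or.inr ⟨by rw [mem_sortedBucket_len a k s hs, mem_sortedBucket_len a k t ht], hle⟩
  · rw [List.pairwise_map]
    refine (sortedKeys_pairwise_lt a).imp ?_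
    intro k1 k2 hlt x hx y hy
    rw [ssKey_le_iff]
    left
    rw [mem_sortedBucket_len a k1 x hx, mem_sortedBucket_len a k2 y hy]
    exact hlt

-- ===== VERDICT (by name: the statement is the Claim_ definition above) =====
theorem scrabble_sort_spec : Claim_equal_scrabble_sort := by
  intro a _
  unfold Spec_scrabble_sort
  exact PySem.List.eq_of_perm_of_pairwise_le_of_injective ssKey ssKey_injective
    ((scrabble_sort_perm a).trans (scrabble_sort_alt_perm a).symm)
    (scrabble_sort_pairwise a) (scrabble_sort_alt_pairwise a)
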